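-- pv_equiv track=rewrite | github.com/huandrew99/LeetCode | interview-exp/huizong.py | increasing_subseq
-- ===== SOURCE A (Python) =====
-- def increasing_subseq(arr):
--     f = [0] * len(arr)
--
--     for k in range(1, 4):
--         for i in range(len(arr)):
--             if k == 1:
--                 f[i] = 1
--             else:
--                 f[i] = 0
--                 for j in range(i + 1, len(arr)):
--                     if arr[j] < arr[i]:
--                         f[i] += f[j]
--     return sum(f)
-- ===== SOURCE B (Python) =====
-- def increasing_subseq(arr):
--     total = 0
--     for j, x in enumerate(arr):
--         left = sum(1 for y in arr[:j] if y > x)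
--         right = sum(1 for y in arr[j+1:] if y < x)
--         total += left * right
--     return total
-- ===== Notes on version B (the rewrite author's own statement) =====
-- stated objective: alternative
-- what changed: Replaces A's three in-place DP passes over f (length-k decreasing suffix counts) by a single middle-element pass: for each j it multiplies the number of larger elements to the left by the number of smaller elements to the right and sums the products.
import Mathlib
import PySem

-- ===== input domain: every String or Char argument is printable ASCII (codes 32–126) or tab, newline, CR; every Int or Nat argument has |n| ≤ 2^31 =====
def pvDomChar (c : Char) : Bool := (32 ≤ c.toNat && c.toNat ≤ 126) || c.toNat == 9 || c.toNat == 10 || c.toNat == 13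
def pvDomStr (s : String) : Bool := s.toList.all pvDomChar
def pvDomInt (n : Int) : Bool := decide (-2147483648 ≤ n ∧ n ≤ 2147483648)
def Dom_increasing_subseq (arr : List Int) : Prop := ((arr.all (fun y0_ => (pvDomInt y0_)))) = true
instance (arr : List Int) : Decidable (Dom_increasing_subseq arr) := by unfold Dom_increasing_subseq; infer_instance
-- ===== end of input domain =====

-- B replaces A's three in-place DP passes by one middle-element pass (left-greater × right-smaller per index); alternative algorithm, same asymptotic cost.

-- ===== PORT A =====
-- inner loop body: 'if arr[j] < arr[i]: f[i] += f[j]'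
def pvInnerStep (arr : List Int) (i : Int) (f : List Int) (j : Int) : List Int :=
  if PySem.List.pyGetD arr j 0 < PySem.List.pyGetD arr i 0 then
    PySem.List.pySetD f i (PySem.List.pyGetD f i 0 + PySem.List.pyGetD f j 0)
  else f

-- body of 'for i in range(len(arr))'
def pvOuterStep (arr : List Int) (k : Int) (f : List Int) (i : Int) : List Int :=
  if k = 1 then PySem.List.pySetD f i 1
  else
    let f := PySem.List.pySetD f i 0
    (PySem.List.pyRange (i + 1) (PySem.List.len arr) 1).foldl (pvInnerStep arr i) f

def increasing_subseq (arr : List Int) : Int :=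
  let f := List.replicate arr.length (0 : Int)
  let f := (PySem.List.pyRange 1 4 1).foldl
      (fun f k => (PySem.List.pyRange 0 (PySem.List.len arr) 1).foldl (pvOuterStep arr k) f) f
  f.sum

-- ===== PORT B =====
def increasing_subseq_alt (arr : List Int) : Int :=
  (PySem.List.enumerate arr).foldl (fun total p =>
    let j := p.1
    let x := p.2
    let left : Int := ((PySem.List.slice arr none (some j)).countP (fun y => decide (x < y)) : Nat)
    let right : Int := ((PySem.List.slice arr (some (j + 1)) none).countP (fun y => decide (y < x)) : Nat)
    total + left * right) 0

-- ===== PRECONDITION & SPEC =====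
def Spec_increasing_subseq (arr : List Int) (out : Int) : Prop := out = increasing_subseq_alt arr
instance (arr : List Int) (out : Int) : Decidable (Spec_increasing_subseq arr out) := by unfold Spec_increasing_subseq; infer_instance

-- ===== CLAIM (what is proved, stated in full; the proofs are below) =====
def Claim_equal_increasing_subseq : Prop := ∀ (arr : List Int), Dom_increasing_subseq arr → Spec_increasing_subseq arr (increasing_subseq arr)

-- ===== LEMMAS AND PROOFS =====

-- 'nv a g i' = sum over j>i with a[j] < a[i] of g j: the value pass k gives f[i] when the previous pass gave g.
def pvNv (a : List Int) (g : Nat → Int) (i : Nat) : Int :=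
  ∑ j ∈ Finset.Ico (i + 1) a.length, if a.getD j 0 < a.getD i 0 then g j else 0

theorem pv_getD_set_self (l : List Int) (i : Nat) (h : i < l.length) (v : Int) :
    (l.set i v).getD i 0 = v := by
  simp [List.getD_eq_getElem?_getD, h]

theorem pv_getD_set_ne (l : List Int) (i j : Nat) (hij : j ≠ i) (v : Int) :
    (l.set i v).getD j 0 = l.getD j 0 := by
  simp [List.getD_eq_getElem?_getD, List.getElem?_set_ne (Ne.symm hij)]

theorem pv_inner_eval (a : List Int) (i : Nat) (hi : i < a.length) :
    ∀ (d m : Nat) (f : List Int), f.length = a.length → i < m → a.length - m = d →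
    (PySem.List.pyRange (m : Int) (PySem.List.len a) 1).foldl (pvInnerStep a (i : Int)) f
      = f.set i (f.getD i 0 +
          ∑ j ∈ Finset.Ico m a.length, if a.getD j 0 < a.getD i 0 then f.getD j 0 else 0) := by
  intro d
  induction d with
  | zero =>
    intro m f hf him hd
    have hnm : a.length ≤ m := by omega
    rw [PySem.List.pyRange_one_eq_nil (by simp; exact_mod_cast hnm)]
    rw [Finset.Ico_eq_empty (by omega)]
    simp only [List.foldl_nil, Finset.sum_empty, add_zero]
    have : f.getD i 0 = f[i]'(by omega) := by
      simp [List.getD_eq_getElem?_getD, List.getElem?_eq_getElem (show i < f.length by omega)]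
    rw [this, List.set_getElem_self]
  | succ d ih =>
    intro m f hf him hd
    have hm : m < a.length := by omega
    rw [PySem.List.pyRange_one_cons (by simp; exact_mod_cast hm)]
    rw [List.foldl_cons]
    have hcast : (m : Int) + 1 = ((m + 1 : Nat) : Int) := by push_cast; ring
    rw [Finset.sum_eq_sum_Ico_succ_bot hm]
    have hstep : pvInnerStep a (i : Int) f (m : Int)
        = if a.getD m 0 < a.getD i 0 then f.set i (f.getD i 0 + f.getD m 0) else f := by
      unfold pvInnerStep
      simp [PySem.List.pyGetD_natCast]
    rw [hstep]
    by_cases hc : a.getD m 0 < a.getD i 0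
    · rw [if_pos hc, if_pos hc]
      rw [hcast, ih (m + 1) (f.set i (f.getD i 0 + f.getD m 0)) (by simp [hf]) (by omega) (by omega)]
      rw [List.set_set]
      congr 1
      rw [pv_getD_set_self f i (by omega)]
      have hsum : ∑ j ∈ Finset.Ico (m + 1) a.length,
          (if a.getD j 0 < a.getD i 0 then (f.set i (f.getD i 0 + f.getD m 0)).getD j 0 else 0)
          = ∑ j ∈ Finset.Ico (m + 1) a.length,
          (if a.getD j 0 < a.getD i 0 then f.getD j 0 else 0) := by
        apply Finset.sum_congr rfl
        intro j hj
        have hj' : m + 1 ≤ j := (Finset.mem_Ico.mp hj).1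
        rw [pv_getD_set_ne f i j (by omega)]
      rw [hsum]; ring
    · rw [if_neg hc, if_neg hc]
      rw [hcast, ih (m + 1) f hf (by omega) (by omega)]
      congr 1; ring

theorem pv_pass_eval (a : List Int) (g : Nat → Int) (k : Int) (hk : ¬ k = 1) :
    ∀ (d m : Nat) (f : List Int), f.length = a.length → a.length - m = d →
    (∀ j, m ≤ j → j < a.length → f.getD j 0 = g j) →
    ((PySem.List.pyRange (m : Int) (PySem.List.len a) 1).foldl (pvOuterStep a k) f).length = a.length ∧
    (∀ j, j < a.length →
      ((PySem.List.pyRange (m : Int) (PySem.List.len a) 1).foldl (pvOuterStep a k) f).getD j 0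
        = if j < m then f.getD j 0 else pvNv a g j) := by
  intro d
  induction d with
  | zero =>
    intro m f hf hd hg
    have hnm : a.length ≤ m := by omega
    rw [PySem.List.pyRange_one_eq_nil (by simp; exact_mod_cast hnm)]
    simp only [List.foldl_nil]
    exact ⟨hf, fun j hj => by rw [if_pos (by omega)]⟩
  | succ d ih =>
    intro m f hf hd hg
    have hm : m < a.length := by omega
    rw [PySem.List.pyRange_one_cons (by simp; exact_mod_cast hm)]
    rw [List.foldl_cons]
    have hcast : (m : Int) + 1 = ((m + 1 : Nat) : Int) := by push_cast; ring
    -- evaluate the body at i = m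
    have hbody : pvOuterStep a k f (m : Int) = f.set m (pvNv a g m) := by
      unfold pvOuterStep
      rw [if_neg hk]
      simp only [PySem.List.pySetD_natCast]
      rw [hcast, pv_inner_eval a m hm (a.length - (m + 1)) (m + 1) (f.set m 0) (by simp [hf])
        (by omega) rfl]
      rw [List.set_set, pv_getD_set_self f m (by omega), zero_add]
      congr 1
      unfold pvNv
      apply Finset.sum_congr rfl
      intro j hj
      have hj' : m + 1 ≤ j := (Finset.mem_Ico.mp hj).1
      have hj'' : j < a.length := (Finset.mem_Ico.mp hj).2
      rw [pv_getD_set_ne f m j (by omega), hg j (by omega) hj'']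
    rw [hbody]
    have hlen' : (f.set m (pvNv a g m)).length = a.length := by simp [hf]
    have hg' : ∀ j, m + 1 ≤ j → j < a.length → (f.set m (pvNv a g m)).getD j 0 = g j := by
      intro j h1 h2
      rw [pv_getD_set_ne f m j (by omega)]
      exact hg j (by omega) h2
    obtain ⟨hl, hv⟩ := ih (m + 1) (f.set m (pvNv a g m)) hlen' (by omega) hg'
    rw [hcast]
    refine ⟨hl, fun j hj => ?_⟩
    rw [hv j hj]
    by_cases h1 : j < m + 1
    · by_cases h2 : j < m
      · rw [if_pos h1, if_pos h2, pv_getD_set_ne f m j (by omega)]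
      · have : j = m := by omega
        subst this
        rw [if_pos h1, if_neg (by omega), pv_getD_set_self f j (by omega)]
    · rw [if_neg h1, if_neg (by omega)]

theorem pv_pass1_eval (a : List Int) :
    ∀ (d m : Nat) (f : List Int), f.length = a.length → a.length - m = d →
    ((PySem.List.pyRange (m : Int) (PySem.List.len a) 1).foldl (pvOuterStep a 1) f).length = a.length ∧
    (∀ j, j < a.length →
      ((PySem.List.pyRange (m : Int) (PySem.List.len a) 1).foldl (pvOuterStep a 1) f).getD j 0
        = if j < m then f.getD j 0 else 1) := by
  intro d
  induction d with
  | zero =>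
    intro m f hf hd
    have hnm : a.length ≤ m := by omega
    rw [PySem.List.pyRange_one_eq_nil (by simp; exact_mod_cast hnm)]
    simp only [List.foldl_nil]
    exact ⟨hf, fun j hj => by rw [if_pos (by omega)]⟩
  | succ d ih =>
    intro m f hf hd
    have hm : m < a.length := by omega
    rw [PySem.List.pyRange_one_cons (by simp; exact_mod_cast hm)]
    rw [List.foldl_cons]
    have hbody : pvOuterStep a 1 f (m : Int) = f.set m 1 := by
      unfold pvOuterStep
      rw [if_pos rfl]
      simp [PySem.List.pySetD_natCast]
    rw [hbody]
    have hcast : (m : Int) + 1 = ((m + 1 : Nat) : Int) := by push_cast; ring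
    obtain ⟨hl, hv⟩ := ih (m + 1) (f.set m 1) (by simp [hf]) (by omega)
    rw [hcast]
    refine ⟨hl, fun j hj => ?_⟩
    rw [hv j hj]
    by_cases h1 : j < m + 1
    · by_cases h2 : j < m
      · rw [if_pos h1, if_pos h2, pv_getD_set_ne f m j (by omega)]
      · have : j = m := by omega
        subst this
        rw [if_pos h1, if_neg (by omega), pv_getD_set_self f j (by omega)]
    · rw [if_neg h1, if_neg (by omega)]

theorem pv_list_sum_eq (l : List Int) : l.sum = ∑ j ∈ Finset.range l.length, l.getD j 0 := by
  induction l with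
  | nil => simp
  | cons x l ih =>
    rw [List.sum_cons, List.length_cons, Finset.sum_range_succ']
    simp only [List.getD_cons_succ, List.getD_cons_zero]
    rw [ih]; ring

theorem pv_A_eval (a : List Int) :
    increasing_subseq a = ∑ i ∈ Finset.range a.length, pvNv a (pvNv a (fun _ => 1)) i := by
  have hr : PySem.List.pyRange 1 4 1 = [1, 2, 3] := by decide
  unfold increasing_subseq
  rw [hr]
  simp only [List.foldl_cons, List.foldl_nil]
  have h0 : ((0 : Nat) : Int) = (0 : Int) := by norm_num
  -- pass 1
  obtain ⟨hl1, hv1⟩ := pv_pass1_eval a a.length 0 (List.replicate a.length 0) (by simp) (by omega)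
  rw [h0] at hl1 hv1
  set f1 := (PySem.List.pyRange 0 (PySem.List.len a) 1).foldl (pvOuterStep a 1)
      (List.replicate a.length 0) with hf1
  -- pass 2
  obtain ⟨hl2, hv2⟩ := pv_pass_eval a (fun _ => 1) 2 (by norm_num) a.length 0 f1 hl1 (by omega)
      (fun j _ hj => by rw [hv1 j hj]; simp)
  rw [h0] at hl2 hv2
  set f2 := (PySem.List.pyRange 0 (PySem.List.len a) 1).foldl (pvOuterStep a 2) f1 with hf2
  -- pass 3
  obtain ⟨hl3, hv3⟩ := pv_pass_eval a (pvNv a (fun _ => 1)) 3 (by norm_num) a.length 0 f2 hl2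
      (by omega) (fun j _ hj => by rw [hv2 j hj]; simp)
  rw [h0] at hl3 hv3
  set f3 := (PySem.List.pyRange 0 (PySem.List.len a) 1).foldl (pvOuterStep a 3) f2 with hf3
  rw [pv_list_sum_eq f3, hl3]
  apply Finset.sum_congr rfl
  intro i hi
  rw [hv3 i (Finset.mem_range.mp hi)]
  simp

theorem pv_countP_eq (l : List Int) (p : Int → Bool) :
    ((l.countP p : Nat) : Int) = ∑ i ∈ Finset.range l.length, if p (l.getD i 0) then 1 else 0 := by
  induction l with
  | nil => simp
  | cons x l ih =>
    rw [List.countP_cons, List.length_cons, Finset.sum_range_succ']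
    simp only [List.getD_cons_succ, List.getD_cons_zero]
    rw [← ih]
    by_cases h : p x <;> simp [h]

theorem pv_countP_take (a : List Int) (p : Int → Bool) (k : Nat) (hk : k ≤ a.length) :
    (((a.take k).countP p : Nat) : Int) = ∑ i ∈ Finset.range k, if p (a.getD i 0) then 1 else 0 := by
  rw [pv_countP_eq]
  rw [List.length_take, Nat.min_eq_left hk]
  apply Finset.sum_congr rfl
  intro i hi
  have hik : i < k := Finset.mem_range.mp hi
  have : (a.take k).getD i 0 = a.getD i 0 := by
    simp [List.getD_eq_getElem?_getD, hik]
  rw [this]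

theorem pv_countP_drop (a : List Int) (p : Int → Bool) (m : Nat) :
    (((a.drop m).countP p : Nat) : Int) = ∑ j ∈ Finset.Ico m a.length, if p (a.getD j 0) then 1 else 0 := by
  rw [pv_countP_eq, List.length_drop, Finset.sum_Ico_eq_sum_range]
  apply Finset.sum_congr rfl
  intro i _
  have : (a.drop m).getD i 0 = a.getD (m + i) 0 := by
    simp [List.getD_eq_getElem?_getD, List.getElem?_drop]
  rw [this]

theorem pv_sum_map_range (n : Nat) (h : Nat → Int) :
    ((List.range n).map h).sum = ∑ i ∈ Finset.range n, h i := by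
  induction n with
  | zero => simp
  | succ n ih => rw [List.range_succ, List.map_append, List.sum_append, Finset.sum_range_succ, ih]; simp

theorem pv_B_eval (a : List Int) :
    increasing_subseq_alt a
      = ∑ j ∈ Finset.range a.length,
          (∑ i ∈ Finset.range j, if a.getD j 0 < a.getD i 0 then (1 : Int) else 0)
            * pvNv a (fun _ => 1) j := by
  unfold increasing_subseq_alt
  rw [PySem.List.enumerate_eq_map_pyRange (d := 0)]
  rw [List.foldl_map]
  rw [PySem.List.foldl_add]
  rw [zero_add]
  simp only [PySem.List.len_eq]
  rw [PySem.List.pyRange_zero_natCast, List.map_map, pv_sum_map_range]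
  apply Finset.sum_congr rfl
  intro j hj
  have hjn : j < a.length := Finset.mem_range.mp hj
  simp only [Function.comp_apply]
  rw [PySem.List.slice_to_natCast]
  have hc : ((j : Int) + 1) = ((j + 1 : Nat) : Int) := by push_cast; ring
  rw [hc, PySem.List.slice_from_natCast]
  simp only [PySem.List.pyGetD_natCast]
  rw [pv_countP_take a _ j (by omega), pv_countP_drop a _ (j + 1)]
  unfold pvNv
  congr 1
  · exact Finset.sum_congr rfl (fun i _ => by simp)
  · exact Finset.sum_congr rfl (fun i _ => by simp)

theorem pv_ico_to_range (m n : Nat) (h : Nat → Int) :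
    ∑ j ∈ Finset.Ico m n, h j = ∑ j ∈ Finset.range n, if m ≤ j then h j else 0 := by
  rw [Finset.sum_ite, Finset.sum_const_zero, add_zero]
  apply Finset.sum_congr _ (fun _ _ => rfl)
  ext j
  simp [Finset.mem_Ico, Finset.mem_filter, Finset.mem_range]
  omega

theorem pv_swap (a : List Int) (g : Nat → Int) :
    ∑ i ∈ Finset.range a.length, pvNv a g i
      = ∑ j ∈ Finset.range a.length,
          (∑ i ∈ Finset.range j, if a.getD j 0 < a.getD i 0 then (1 : Int) else 0) * g j := by
  have step1 : ∀ i, pvNv a g i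
      = ∑ j ∈ Finset.range a.length,
          if i < j ∧ a.getD j 0 < a.getD i 0 then g j else 0 := by
    intro i
    unfold pvNv
    rw [pv_ico_to_range]
    apply Finset.sum_congr rfl
    intro j _
    by_cases h1 : i + 1 ≤ j <;> by_cases h2 : a.getD j 0 < a.getD i 0 <;>
      simp [h1] <;> omega
  calc ∑ i ∈ Finset.range a.length, pvNv a g i
      = ∑ i ∈ Finset.range a.length, ∑ j ∈ Finset.range a.length,
          (if i < j ∧ a.getD j 0 < a.getD i 0 then g j else 0) := by
        exact Finset.sum_congr rfl (fun i _ => step1 i)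
    _ = ∑ j ∈ Finset.range a.length, ∑ i ∈ Finset.range a.length,
          (if i < j ∧ a.getD j 0 < a.getD i 0 then g j else 0) := Finset.sum_comm
    _ = ∑ j ∈ Finset.range a.length,
          (∑ i ∈ Finset.range j, if a.getD j 0 < a.getD i 0 then (1 : Int) else 0) * g j := by
        apply Finset.sum_congr rfl
        intro j hj
        have hjn : j < a.length := Finset.mem_range.mp hj
        rw [Finset.sum_mul]
        have hsub : ∑ i ∈ Finset.range a.length,
            (if i < j ∧ a.getD j 0 < a.getD i 0 then g j else 0)
            = ∑ i ∈ Finset.range j, (if a.getD j 0 < a.getD i 0 then g j else 0) := by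
          rw [Finset.sum_ite, Finset.sum_const_zero, add_zero,
              Finset.sum_ite, Finset.sum_const_zero, add_zero]
          apply Finset.sum_congr _ (fun _ _ => rfl)
          ext i
          simp [Finset.mem_filter, Finset.mem_range]
          omega
        rw [hsub]
        exact Finset.sum_congr rfl (fun i _ => by simp)

-- ===== VERDICT (by name: the statement is the Claim_ definition above) =====
theorem increasing_subseq_spec : Claim_equal_increasing_subseq := by
  intro arr _
  unfold Spec_increasing_subseq
  rw [pv_A_eval, pv_B_eval, pv_swap]
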